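-- pv_equiv track=rewrite | github.com/dhhruv/Binary-Search-Solutions | Double, Reverse, and Swap.py | solve
-- ===== SOURCE A (Python) =====
-- def solve(n):
--     s = "xxy"
--     ct = 0
--     for i in range(1, n + 1):
--         if ct == 0:
--             s = s * 2
--         elif ct == 1:
--             s = s[::-1]
--         elif ct == 2:
--             temp = ""
--             for j in s:
--                 if j == "x":
--                     temp += "y"
--                 else:
--                     temp += "x"
--             s = temp
--         if ct == 2:
--             ct = 0
--         else:
--             ct += 1
--     return s
-- ===== SOURCE B (Python) =====
-- def solve(n):
--     # Closed form: after each full double/reverse/swap cycle the string is a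
--     # power of a 3-char block; q cycles give 2**q copies, parity of q picks the block.
--     if n <= 0:
--         return "xxy"
--     q, r = divmod(n, 3)
--     if r == 2:
--         base = "yxx" if q % 2 == 0 else "yyx"
--     else:
--         base = "xxy" if q % 2 == 0 else "xyy"
--     reps = 2 ** q if r == 0 else 2 ** (q + 1)
--     return base * reps
-- ===== Notes on version B (the rewrite author's own statement) =====
-- stated objective: alternative
-- what changed: Replaces the step-by-step double/reverse/swap state machine (which repeatedly copies, reverses and character-maps an exponentially growing string) by a closed form: the result is one of four three-character blocks, selected by n modulo three and the parity of the quotient, repeated a power-of-two number of times with a single string repetition.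
import Mathlib
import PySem

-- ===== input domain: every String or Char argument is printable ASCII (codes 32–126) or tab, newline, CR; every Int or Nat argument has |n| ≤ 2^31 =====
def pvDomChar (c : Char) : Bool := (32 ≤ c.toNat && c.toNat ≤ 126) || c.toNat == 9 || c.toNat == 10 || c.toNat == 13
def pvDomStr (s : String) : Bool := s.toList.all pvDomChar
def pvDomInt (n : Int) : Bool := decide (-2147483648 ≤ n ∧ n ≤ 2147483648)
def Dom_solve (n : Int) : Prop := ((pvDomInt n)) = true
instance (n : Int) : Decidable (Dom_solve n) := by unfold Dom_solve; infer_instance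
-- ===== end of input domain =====

-- B replaces A's step-by-step double/reverse/swap state machine by a closed form:
-- a fixed three-character block repeated a power-of-two number of times (alternative decomposition).


-- ===== PORT A =====
-- strings of A are modelled as their char lists (PySem string ops are defined on List Char)
def solveStep (p : List Char × Int) (_i : Int) : List Char × Int :=
  let s := p.1
  let ct := p.2
  let s' :=
    if ct = 0 then s ++ s                               -- s = s * 2
    else if ct = 1 then
      (PySem.List.slice? s none none (-1)).getD s       -- s = s[::-1]; step -1 ≠ 0 so never none
    else if ct = 2 then
      -- temp = ""; for j in s: temp += "y" if j == "x" else "x"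
      s.foldl (fun temp j => temp ++ (if j = 'x' then ['y'] else ['x'])) []
    else s
  (s', if ct = 2 then 0 else ct + 1)

def solve (n : Int) : String :=
  let st := (PySem.List.pyRange 1 (n + 1) 1).foldl solveStep ("xxy".toList, 0)
  String.ofList st.1

-- ===== PORT B =====
-- base * reps  (Source B's string repetition, transcribed structurally)
def repChars (b : List Char) : Nat → List Char
  | 0 => []
  | k + 1 => b ++ repChars b k

def solve_alt (n : Int) : String :=
  if n ≤ 0 then "xxy"
  else
    let q := PySem.Int.floordiv n 3
    let r := PySem.Int.mod n 3
    let base : List Char :=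
      if r = 2 then (if PySem.Int.mod q 2 = 0 then "yxx".toList else "yyx".toList)
      else (if PySem.Int.mod q 2 = 0 then "xxy".toList else "xyy".toList)
    -- q ≥ 0 here (n ≥ 1), so Python's 2 ** q is 2 ^ q.toNat
    let reps : Nat := if r = 0 then 2 ^ q.toNat else 2 ^ (q.toNat + 1)
    String.ofList (repChars base reps)

-- ===== PRECONDITION & SPEC =====
def Spec_solve (n : Int) (out : String) : Prop := out = solve_alt n
instance (n : Int) (out : String) : Decidable (Spec_solve n out) := by unfold Spec_solve; infer_instance

-- ===== CLAIM (what is proved, stated in full; the proofs are below) =====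
def Claim_equal_solve : Prop := ∀ (n : Int), Dom_solve n → Spec_solve n (solve n)

-- ===== LEMMAS AND PROOFS =====

-- the loop body with the (unused) loop index fixed
def stp (p : List Char × Int) : List Char × Int := solveStep p 0

-- swap of one char, and g = swap ∘ reverse (one full cycle's tail after the doubling)
def swc (c : Char) : Char := if c = 'x' then 'y' else 'x'
def gsw (l : List Char) : List Char := l.reverse.map swc

-- the parity-dependent base block after k full cycles
def baseL (k : Nat) : List Char := if k % 2 = 0 then "xxy".toList else "xyy".toList

-- the common closed form both ports are reduced to
def closed (N : Nat) : List Char :=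
  if N % 3 = 0 then repChars (baseL (N / 3)) (2 ^ (N / 3))
  else if N % 3 = 1 then repChars (baseL (N / 3)) (2 ^ (N / 3 + 1))
  else repChars ((baseL (N / 3)).reverse) (2 ^ (N / 3 + 1))

lemma foldl_ignore (l : List Int) (st : List Char × Int) :
    l.foldl solveStep st = stp^[l.length] st := by
  induction l generalizing st with
  | nil => rfl
  | cons x xs ih =>
      rw [List.foldl_cons, ih, List.length_cons, Function.iterate_succ_apply]
      rfl

lemma swap_foldl (l : List Char) (acc : List Char) :
    l.foldl (fun temp j => temp ++ (if j = 'x' then ['y'] else ['x'])) acc = acc ++ l.map swc := by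
  induction l generalizing acc with
  | nil => simp
  | cons c cs ih => by_cases hc : c = 'x' <;> simp [ih, swc, hc]

lemma stp_0 (s : List Char) : stp (s, 0) = (s ++ s, 1) := rfl

lemma stp_1 (s : List Char) : stp (s, 1) = (s.reverse, 2) := by
  simp [stp, solveStep, PySem.List.slice?_none_none_neg_one]

lemma stp_2 (s : List Char) : stp (s, 2) = (s.map swc, 0) := by
  show (s.foldl (fun temp j => temp ++ (if j = 'x' then ['y'] else ['x'])) [], 0) = _
  rw [swap_foldl]
  rfl

lemma stp3 (s : List Char) : stp^[3] (s, 0) = (gsw s ++ gsw s, 0) := by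
  show stp (stp (stp (s, 0))) = _
  rw [stp_0, stp_1, stp_2]
  simp [gsw, List.reverse_append]

lemma gsw_append (u v : List Char) : gsw (u ++ v) = gsw v ++ gsw u := by
  simp [gsw]

lemma repChars_snoc (b : List Char) (m : Nat) :
    repChars b m ++ b = b ++ repChars b m := by
  induction m with
  | zero => simp [repChars]
  | succ k ih => simp only [repChars, List.append_assoc, ih]

lemma gsw_rep (b : List Char) (m : Nat) : gsw (repChars b m) = repChars (gsw b) m := by
  induction m with
  | zero => simp [repChars, gsw]
  | succ k ih =>
      simp only [repChars, gsw_append, ih]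
      rw [repChars_snoc]

lemma rep_add (b : List Char) (m k : Nat) :
    repChars b (m + k) = repChars b m ++ repChars b k := by
  induction m with
  | zero => simp [repChars]
  | succ j ih => simp [repChars, Nat.succ_add, ih]

lemma rep_reverse (b : List Char) (m : Nat) :
    (repChars b m).reverse = repChars b.reverse m := by
  induction m with
  | zero => simp [repChars]
  | succ k ih =>
      simp only [repChars, List.reverse_append, ih]
      rw [repChars_snoc]

lemma gsw_baseL (k : Nat) : gsw (baseL k) = baseL (k + 1) := by
  rcases Nat.even_or_odd k with h | h
  · have h0 : k % 2 = 0 := Nat.even_iff.mp h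
    simp only [baseL, h0, Nat.succ_mod_two_eq_one_iff.mpr h0]
    decide
  · have h1 : k % 2 = 1 := Nat.odd_iff.mp h
    simp only [baseL, h1, Nat.succ_mod_two_eq_zero_iff.mpr h1]
    decide

lemma main_cycles (k : Nat) :
    stp^[3 * k] ("xxy".toList, 0) = (repChars (baseL k) (2 ^ k), 0) := by
  induction k with
  | zero => simp [repChars, baseL]
  | succ j ih =>
      have h3 : 3 * (j + 1) = 3 + 3 * j := by ring
      rw [h3, Function.iterate_add_apply, ih, stp3, gsw_rep, gsw_baseL]
      congr 1
      rw [← rep_add]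
      congr 1
      ring

lemma a_closed (N : Nat) : (stp^[N] ("xxy".toList, 0)).1 = closed N := by
  have hsplit : N = N % 3 + 3 * (N / 3) := by omega
  rw [hsplit, Function.iterate_add_apply, main_cycles]
  have hlt : N % 3 < 3 := by omega
  unfold closed
  rw [← hsplit]
  interval_cases h : N % 3
  · rw [if_pos rfl]
    rfl
  · rw [if_neg (by norm_num), if_pos rfl]
    rw [Function.iterate_one, stp_0]
    show repChars (baseL (N / 3)) (2 ^ (N / 3)) ++ repChars (baseL (N / 3)) (2 ^ (N / 3)) = _
    rw [← rep_add, pow_succ]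
    congr 1
    ring
  · rw [if_neg (by norm_num), if_neg (by norm_num)]
    show (stp (stp (repChars (baseL (N / 3)) (2 ^ (N / 3)), 0))).1 = _
    rw [stp_0, stp_1]
    show (repChars (baseL (N / 3)) (2 ^ (N / 3)) ++ repChars (baseL (N / 3)) (2 ^ (N / 3))).reverse = _
    rw [List.reverse_append, rep_reverse, ← rep_add, pow_succ]
    congr 1
    ring

lemma b_closed (n : Int) (h : 0 < n) : solve_alt n = String.ofList (closed n.toNat) := by
  unfold solve_alt
  rw [if_neg (by omega)]
  have hq : PySem.Int.floordiv n 3 = ((n.toNat / 3 : Nat) : Int) := by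
    rw [PySem.Int.floordiv_eq_ediv_of_pos (by omega)]; omega
  have hr : PySem.Int.mod n 3 = ((n.toNat % 3 : Nat) : Int) := by
    rw [PySem.Int.mod_eq_emod_of_pos (by omega)]; omega
  have hq2 : PySem.Int.mod ((n.toNat / 3 : Nat) : Int) 2 = ((n.toNat / 3 % 2 : Nat) : Int) := by
    rw [PySem.Int.mod_eq_emod_of_pos (by omega)]; omega
  simp only [hq, hr, hq2, Int.toNat_natCast]
  set N : Nat := n.toNat with hN
  set q : Nat := N / 3 with hqdef
  have hrlt : N % 3 < 3 := by omega
  unfold closed baseL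
  interval_cases hr3 : N % 3 <;>
    rw [← hqdef] <;>
    rcases Nat.even_or_odd q with hpar | hpar <;>
    first
      | (have e : q % 2 = 0 := Nat.even_iff.mp hpar
         simp [e])
      | (have e : q % 2 = 1 := Nat.odd_iff.mp hpar
         simp [e])

-- ===== VERDICT (by name: the statement is the Claim_ definition above) =====
theorem solve_spec : Claim_equal_solve := by
  intro n _
  unfold Spec_solve
  by_cases hle : n ≤ 0
  · have hnil : PySem.List.pyRange 1 (n + 1) 1 = [] :=
      PySem.List.pyRange_one_eq_nil (by omega)
    unfold solve solve_alt
    rw [if_pos hle]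
    simp [hnil]
  · have hpos : 0 < n := by omega
    rw [b_closed n hpos]
    unfold solve
    rw [foldl_ignore, PySem.List.length_pyRange_one]
    have h1 : (n + 1 - 1).toNat = n.toNat := by omega
    rw [h1]
    show String.ofList (stp^[n.toNat] ("xxy".toList, 0)).1 = _
    rw [a_closed]
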